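-- pv_equiv track=rewrite | github.com/Krejdom/advent-of-code | 2023/03.py | is_engine_part
-- ===== SOURCE A (Python) =====
-- def is_engine_part(x, y, part_len, symbol_coords):
--     if ((x, y) in symbol_coords or          # after
--         (x, y-part_len-1) in symbol_coords  # before
--         ):
--         return True
--     for i in range(part_len+2):
--         if ((x-1, y-part_len-1+i) in symbol_coords or   # above
--             (x+1, y-part_len-1+i) in symbol_coords):    # below
--             return True
--     return False
-- ===== SOURCE B (Python) =====
-- def is_engine_part(x, y, part_len, symbol_coords):
--     # Invert the traversal: scan the symbol coordinates once and test each one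
--     # geometrically against the border region in O(1), independent of part_len.
--     top = y - part_len - 1
--     return any(
--         (a == x and (b == y or b == top)) or (abs(a - x) == 1 and top <= b <= y)
--         for a, b in symbol_coords
--     )
-- ===== Notes on version B (the rewrite author's own statement) =====
-- stated objective: alternative
-- what changed: B inverts the traversal: instead of enumerating the border cells and scanning symbol_coords for each (A), it makes one pass over symbol_coords and tests each coordinate geometrically in O(1) against the border region (the x-1/x+1 band over columns top..y plus the two middle endpoints).
import Mathlib
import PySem

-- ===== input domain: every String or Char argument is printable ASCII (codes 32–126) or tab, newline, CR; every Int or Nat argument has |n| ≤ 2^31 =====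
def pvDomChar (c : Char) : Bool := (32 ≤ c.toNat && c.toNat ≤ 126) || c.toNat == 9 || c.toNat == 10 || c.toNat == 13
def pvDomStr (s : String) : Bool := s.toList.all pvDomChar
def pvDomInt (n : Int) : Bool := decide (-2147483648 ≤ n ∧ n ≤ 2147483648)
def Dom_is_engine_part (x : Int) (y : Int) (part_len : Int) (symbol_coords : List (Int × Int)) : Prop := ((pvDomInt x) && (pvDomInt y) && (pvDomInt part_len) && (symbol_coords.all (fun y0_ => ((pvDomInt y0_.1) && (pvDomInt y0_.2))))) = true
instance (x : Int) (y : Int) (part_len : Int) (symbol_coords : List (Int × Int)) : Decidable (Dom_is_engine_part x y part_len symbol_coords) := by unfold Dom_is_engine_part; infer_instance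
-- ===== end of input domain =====

-- B scans symbol_coords once, testing each coordinate geometrically against the border region,
-- instead of A's enumeration of border cells with a membership scan per cell (alternative decomposition).


-- ===== PORT A =====
def is_engine_part (x : Int) (y : Int) (part_len : Int) (symbol_coords : List (Int × Int)) : Bool :=
  if symbol_coords.contains (x, y) || symbol_coords.contains (x, y - part_len - 1) then
    true
  else
    -- for i in range(part_len+2): if ... : return True  /  return False
    (PySem.List.pyRange 0 (part_len + 2) 1).any (fun i =>
      symbol_coords.contains (x - 1, y - part_len - 1 + i) ||
      symbol_coords.contains (x + 1, y - part_len - 1 + i))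

-- ===== PORT B =====
-- One pass over symbol_coords; per coordinate an O(1) geometric test against the border region.
def is_engine_part_alt (x : Int) (y : Int) (part_len : Int) (symbol_coords : List (Int × Int)) : Bool :=
  let top := y - part_len - 1
  symbol_coords.any (fun p =>
    (p.1 == x && (p.2 == y || p.2 == top)) ||
    ((p.1 - x).natAbs == 1 && decide (top ≤ p.2) && decide (p.2 ≤ y)))

-- ===== PRECONDITION & SPEC =====
def Spec_is_engine_part (x : Int) (y : Int) (part_len : Int) (symbol_coords : List (Int × Int)) (out : Bool) : Prop := out = is_engine_part_alt x y part_len symbol_coords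
instance (x : Int) (y : Int) (part_len : Int) (symbol_coords : List (Int × Int)) (out : Bool) : Decidable (Spec_is_engine_part x y part_len symbol_coords out) := by unfold Spec_is_engine_part; infer_instance

-- ===== CLAIM =====
def Claim_equal_is_engine_part : Prop := ∀ (x : Int) (y : Int) (part_len : Int) (symbol_coords : List (Int × Int)), Dom_is_engine_part x y part_len symbol_coords → Spec_is_engine_part x y part_len symbol_coords (is_engine_part x y part_len symbol_coords)

-- ===== LEMMAS AND PROOFS =====

-- ===== VERDICT =====
theorem is_engine_part_spec : Claim_equal_is_engine_part := by
  intro x y L sc _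
  unfold Spec_is_engine_part is_engine_part is_engine_part_alt
  have habs : ∀ a : Int, (a - x).natAbs = 1 ↔ a = x - 1 ∨ a = x + 1 := by intro a; omega
  by_cases hc : (sc.contains (x, y) || sc.contains (x, y - L - 1)) = true
  · rw [if_pos hc]
    symm; rw [List.any_eq_true]
    rcases Bool.or_eq_true_iff.mp hc with h | h
    · exact ⟨(x, y), by simpa using h, by simp⟩
    · exact ⟨(x, y - L - 1), by simpa using h, by simp⟩
  · rw [if_neg hc]
    simp only [Bool.or_eq_true, not_or, Bool.not_eq_true] at hc
    rw [Bool.eq_iff_iff, List.any_eq_true, List.any_eq_true]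
    constructor
    · rintro ⟨i, hi, hor⟩
      rw [PySem.List.mem_pyRange_one] at hi
      rcases Bool.or_eq_true_iff.mp hor with h | h
      · refine ⟨(x - 1, y - L - 1 + i), by simpa using h, ?_⟩
        simp only [Bool.or_eq_true, Bool.and_eq_true, beq_iff_eq, decide_eq_true_eq]
        omega
      · refine ⟨(x + 1, y - L - 1 + i), by simpa using h, ?_⟩
        simp only [Bool.or_eq_true, Bool.and_eq_true, beq_iff_eq, decide_eq_true_eq]
        omega
    · rintro ⟨⟨a, b⟩, hmem, hcond⟩
      simp only [Bool.or_eq_true, Bool.and_eq_true, beq_iff_eq, decide_eq_true_eq] at hcond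
      rcases hcond with ⟨ha, hb⟩ | ⟨⟨h1, hlo⟩, hhi⟩
      · subst ha
        rcases hb with hb | hb <;> rw [hb] at hmem
        · exact absurd hmem (by simpa using hc.1)
        · exact absurd hmem (by simpa using hc.2)
      · rcases (habs a).mp h1 with rfl | rfl
        · refine ⟨b - (y - L - 1), ?_, Bool.or_eq_true_iff.mpr (Or.inl ?_)⟩
          · rw [PySem.List.mem_pyRange_one]; omega
          · have : y - L - 1 + (b - (y - L - 1)) = b := by ring
            rw [this]; simpa using hmem
        · refine ⟨b - (y - L - 1), ?_, Bool.or_eq_true_iff.mpr (Or.inr ?_)⟩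
          · rw [PySem.List.mem_pyRange_one]; omega
          · have : y - L - 1 + (b - (y - L - 1)) = b := by ring
            rw [this]; simpa using hmem
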